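-- pv_equiv track=rewrite | github.com/j1mmyson/PS | python/baekjoon/GOLD/G5_9663_NQueen.py | makeNew
-- ===== SOURCE A (Python) =====
-- def makeNew(current, n):
--     board=[]
--     can = set(i for i in range(n))
--     loc = len(current)
--     ind = 0
--     for i in current:
--         can.discard(i)
--         gap = loc - ind
--         can.discard(i-gap)
--         can.discard(i+gap)
--         ind += 1
--
--     for i in range(n):
--         if i in can:
--             board.append(current + [i])
--     return board
-- ===== SOURCE B (Python) =====
-- def makeNew(current, n):
--     loc = len(current)
--     board = []
--     for i in range(n):
--         conflict = False
--         for ind, c in enumerate(current):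
--             gap = loc - ind
--             if i == c or i == c - gap or i == c + gap:
--                 conflict = True
--                 break
--         if not conflict:
--             board.append(current + [i])
--     return board
-- ===== Notes on version B (the rewrite author's own statement) =====
-- stated objective: idiomatic
-- what changed: B drops the precomputed forbidden-column set and instead tests each candidate column directly against the placed queens (column and both diagonals via gap = loc - ind) with an early-exit inner scan.
import Mathlib
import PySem

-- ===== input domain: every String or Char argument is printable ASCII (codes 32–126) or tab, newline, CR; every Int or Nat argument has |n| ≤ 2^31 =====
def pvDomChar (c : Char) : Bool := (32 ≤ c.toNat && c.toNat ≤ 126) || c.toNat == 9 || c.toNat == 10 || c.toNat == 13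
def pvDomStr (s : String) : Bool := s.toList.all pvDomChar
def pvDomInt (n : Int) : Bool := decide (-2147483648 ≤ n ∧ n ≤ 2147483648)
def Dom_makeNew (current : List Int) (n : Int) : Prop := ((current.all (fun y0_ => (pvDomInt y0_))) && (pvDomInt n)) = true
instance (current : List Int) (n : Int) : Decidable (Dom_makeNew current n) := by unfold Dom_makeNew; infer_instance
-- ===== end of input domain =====

-- B drops A's precomputed forbidden-column set: each candidate column is tested directly
-- against the placed queens with an early-exit scan (objective: more idiomatic).

-- ===== PORT A =====
def makeNew (current : List Int) (n : Int) : List (List Int) :=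
  let board : List (List Int) := []
  let can : PySem.Set Int := PySem.Set.ofList (PySem.List.pyRange 0 n 1)
  let loc : Int := (current.length : Int)
  let st :=
    current.foldl (fun (p : PySem.Set Int × Int) i =>
      let can := PySem.Set.discard p.1 i
      let gap := loc - p.2
      let can := PySem.Set.discard can (i - gap)
      let can := PySem.Set.discard can (i + gap)
      (can, p.2 + 1)) (can, (0 : Int))
  (PySem.List.pyRange 0 n 1).foldl (fun b i =>
      if PySem.Set.contains st.1 i then b ++ [current ++ [i]] else b) board

-- ===== PORT B =====
-- inner 'for ind, c in enumerate(current): ... break' loop of Source B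
def conflictAux (loc : Int) (i : Int) (ind : Int) (cur : List Int) : Bool :=
  match cur with
  | [] => false
  | c :: rest =>
    let gap := loc - ind
    if i == c || i == c - gap || i == c + gap then true
    else conflictAux loc i (ind + 1) rest

def makeNew_alt (current : List Int) (n : Int) : List (List Int) :=
  let loc : Int := (current.length : Int)
  (PySem.List.pyRange 0 n 1).foldl (fun b i =>
      if conflictAux loc i 0 current then b else b ++ [current ++ [i]]) []

-- ===== PRECONDITION & SPEC =====
def Spec_makeNew (current : List Int) (n : Int) (out : List (List Int)) : Prop := out = makeNew_alt current n
instance (current : List Int) (n : Int) (out : List (List Int)) : Decidable (Spec_makeNew current n out) := by unfold Spec_makeNew; infer_instance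

-- ===== CLAIM (what is proved, stated in full; the proofs are below) =====
def Claim_equal_makeNew : Prop := ∀ (current : List Int) (n : Int), Dom_makeNew current n → Spec_makeNew current n (makeNew current n)

-- ===== LEMMAS AND PROOFS =====

-- membership in A's folded forbidden-set state ↔ no conflict found by B's scan
theorem mem_foldA (loc : Int) (cur : List Int) :
    ∀ (s : PySem.Set Int) (ind : Int) (x : Int),
      (x ∈ (cur.foldl (fun (p : PySem.Set Int × Int) i =>
        let can := PySem.Set.discard p.1 i
        let gap := loc - p.2
        let can := PySem.Set.discard can (i - gap)
        let can := PySem.Set.discard can (i + gap)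
        (can, p.2 + 1)) (s, ind)).1)
      ↔ (x ∈ s ∧ conflictAux loc x ind cur = false) := by
  induction cur with
  | nil => intro s ind x; simp [conflictAux]
  | cons c rest ih =>
    intro s ind x
    simp only [List.foldl_cons]
    rw [ih]
    simp only [PySem.Set.mem_discard, conflictAux]
    by_cases hx : (x == c || x == c - (loc - ind) || x == c + (loc - ind)) = true
    · simp only [hx, if_true]
      simp only [beq_iff_eq, Bool.or_eq_true] at hx
      constructor
      · rintro ⟨⟨⟨⟨-, h1⟩, h2⟩, h3⟩, -⟩
        rcases hx with (h | h) | h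
        · exact absurd h h1
        · exact absurd h h2
        · exact absurd h h3
      · rintro ⟨-, h⟩; cases h
    · simp only [hx, if_neg, Bool.false_eq_true, not_false_eq_true]
      simp only [beq_iff_eq, Bool.or_eq_true, not_or] at hx
      obtain ⟨⟨h1, h2⟩, h3⟩ := hx
      tauto

-- ===== VERDICT (by name: the statement is the Claim_ definition above) =====
theorem makeNew_spec : Claim_equal_makeNew := by
  intro current n _
  unfold Spec_makeNew makeNew makeNew_alt
  simp only
  apply PySem.List.foldl_congr_mem
  intro acc x hx
  have hmem : x ∈ PySem.Set.ofList (PySem.List.pyRange 0 n 1) := by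
    rw [PySem.Set.mem_ofList]; exact hx
  have h := mem_foldA ((current.length : Int)) current
    (PySem.Set.ofList (PySem.List.pyRange 0 n 1)) 0 x
  cases hc : conflictAux ((current.length : Int)) x 0 current with
  | false =>
    have hcont := (PySem.Set.contains_iff _ _).mpr (h.mpr ⟨hmem, hc⟩)
    rw [hcont]; simp
  | true =>
    have hcont : PySem.Set.contains
        ((current.foldl (fun (p : PySem.Set Int × Int) i =>
          let can := PySem.Set.discard p.1 i
          let gap := (current.length : Int) - p.2
          let can := PySem.Set.discard can (i - gap)
          let can := PySem.Set.discard can (i + gap)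
          (can, p.2 + 1)) (PySem.Set.ofList (PySem.List.pyRange 0 n 1), (0 : Int))).1) x = false := by
      rw [Bool.eq_false_iff, Ne, PySem.Set.contains_iff, h]
      simp [hc]
    rw [hcont]; simp
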